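-- pv_equiv track=rewrite | github.com/zohidillo/django-project-generator | django_gen/scripts/rewriting.py | rewrite_middleware
-- ===== SOURCE A (Python) =====
-- def rewrite_middleware(use_whitenoise, use_drf, use_debug_toolbar, settings):
--     middleware_list = [
--         'django.middleware.security.SecurityMiddleware',
--         'django.contrib.sessions.middleware.SessionMiddleware',
--         'django.middleware.locale.LocaleMiddleware',
--         'django.middleware.common.CommonMiddleware',
--         'django.middleware.csrf.CsrfViewMiddleware',
--         'django.contrib.auth.middleware.AuthenticationMiddleware',
--         'django.contrib.messages.middleware.MessageMiddleware',
--         'django.middleware.clickjacking.XFrameOptionsMiddleware',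
--     ]
--
--     if use_whitenoise:
--         i = middleware_list.index('django.middleware.security.SecurityMiddleware')
--         middleware_list.insert(i + 1, "whitenoise.middleware.WhiteNoiseMiddleware")
--
--     if use_drf:
--         middleware_list.insert(0, "corsheaders.middleware.CorsMiddleware")
--
--     if use_debug_toolbar:
--         i = middleware_list.index('django.contrib.sessions.middleware.SessionMiddleware')
--         middleware_list.insert(i + 1, "debug_toolbar.middleware.DebugToolbarMiddleware")
--
--     settings += "MIDDLEWARE = [\n    " + ",\n    ".join(f'"{mw}"' for mw in middleware_list) + "\n]"
--     return settings
-- ===== SOURCE B (Python) =====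
-- def rewrite_middleware(use_whitenoise, use_drf, use_debug_toolbar, settings):
--     mws = []
--     if use_drf:
--         mws.append("corsheaders.middleware.CorsMiddleware")
--     mws.append('django.middleware.security.SecurityMiddleware')
--     if use_whitenoise:
--         mws.append("whitenoise.middleware.WhiteNoiseMiddleware")
--     mws.append('django.contrib.sessions.middleware.SessionMiddleware')
--     if use_debug_toolbar:
--         mws.append("debug_toolbar.middleware.DebugToolbarMiddleware")
--     mws.extend([
--         'django.middleware.locale.LocaleMiddleware',
--         'django.middleware.common.CommonMiddleware',
--         'django.middleware.csrf.CsrfViewMiddleware',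
--         'django.contrib.auth.middleware.AuthenticationMiddleware',
--         'django.contrib.messages.middleware.MessageMiddleware',
--         'django.middleware.clickjacking.XFrameOptionsMiddleware',
--     ])
--     return settings + "MIDDLEWARE = [\n    " + ",\n    ".join('"%s"' % mw for mw in mws) + "\n]"
-- ===== Notes on version B (the rewrite author's own statement) =====
-- stated objective: simpler
-- what changed: B builds the middleware list directly in its final order with conditional appends instead of A's .index() lookups and positional insert mutations on a base list.
import Mathlib
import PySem

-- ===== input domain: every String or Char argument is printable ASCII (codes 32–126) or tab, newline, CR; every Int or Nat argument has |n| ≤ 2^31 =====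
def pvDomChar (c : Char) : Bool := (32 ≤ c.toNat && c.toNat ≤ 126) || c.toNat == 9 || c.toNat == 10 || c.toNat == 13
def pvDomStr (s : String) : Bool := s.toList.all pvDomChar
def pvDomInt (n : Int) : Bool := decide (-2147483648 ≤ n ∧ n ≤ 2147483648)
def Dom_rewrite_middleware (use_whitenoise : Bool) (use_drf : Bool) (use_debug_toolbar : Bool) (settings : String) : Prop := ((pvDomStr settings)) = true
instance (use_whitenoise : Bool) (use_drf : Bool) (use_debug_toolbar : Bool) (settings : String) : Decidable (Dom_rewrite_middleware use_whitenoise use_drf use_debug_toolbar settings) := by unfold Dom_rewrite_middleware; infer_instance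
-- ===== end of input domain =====

-- B replaces A's .index()/positional-insert mutations by building the middleware
-- list directly in its final order (objective: simpler). Return value only
-- (A rebinds its local `settings`; neither program mutates caller state).

-- ===== PORT A =====
def rewrite_middleware (use_whitenoise : Bool) (use_drf : Bool) (use_debug_toolbar : Bool) (settings : String) : String :=
  let middleware_list : List String := [
    "django.middleware.security.SecurityMiddleware",
    "django.contrib.sessions.middleware.SessionMiddleware",
    "django.middleware.locale.LocaleMiddleware",
    "django.middleware.common.CommonMiddleware",
    "django.middleware.csrf.CsrfViewMiddleware",
    "django.contrib.auth.middleware.AuthenticationMiddleware",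
    "django.contrib.messages.middleware.MessageMiddleware",
    "django.middleware.clickjacking.XFrameOptionsMiddleware"]
  let middleware_list :=
    if use_whitenoise then
      -- .index raises ValueError if absent; the element is a literal member, so none is unreachable
      match PySem.List.index? middleware_list "django.middleware.security.SecurityMiddleware" with
      | some i => PySem.List.insert middleware_list ((i : Int) + 1) "whitenoise.middleware.WhiteNoiseMiddleware"
      | none => middleware_list
    else middleware_list
  let middleware_list :=
    if use_drf then PySem.List.insert middleware_list 0 "corsheaders.middleware.CorsMiddleware"
    else middleware_list
  let middleware_list :=
    if use_debug_toolbar then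
      match PySem.List.index? middleware_list "django.contrib.sessions.middleware.SessionMiddleware" with
      | some i => PySem.List.insert middleware_list ((i : Int) + 1) "debug_toolbar.middleware.DebugToolbarMiddleware"
      | none => middleware_list
    else middleware_list
  settings ++ ("MIDDLEWARE = [\n    " ++ PySem.Str.join ",\n    " (middleware_list.map (fun mw => "\"" ++ mw ++ "\"")) ++ "\n]")

-- ===== PORT B =====
def rewrite_middleware_alt (use_whitenoise : Bool) (use_drf : Bool) (use_debug_toolbar : Bool) (settings : String) : String :=
  let mws : List String := []
  let mws := if use_drf then mws ++ ["corsheaders.middleware.CorsMiddleware"] else mws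
  let mws := mws ++ ["django.middleware.security.SecurityMiddleware"]
  let mws := if use_whitenoise then mws ++ ["whitenoise.middleware.WhiteNoiseMiddleware"] else mws
  let mws := mws ++ ["django.contrib.sessions.middleware.SessionMiddleware"]
  let mws := if use_debug_toolbar then mws ++ ["debug_toolbar.middleware.DebugToolbarMiddleware"] else mws
  let mws := mws ++ [
    "django.middleware.locale.LocaleMiddleware",
    "django.middleware.common.CommonMiddleware",
    "django.middleware.csrf.CsrfViewMiddleware",
    "django.contrib.auth.middleware.AuthenticationMiddleware",
    "django.contrib.messages.middleware.MessageMiddleware",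
    "django.middleware.clickjacking.XFrameOptionsMiddleware"]
  settings ++ ("MIDDLEWARE = [\n    " ++ PySem.Str.join ",\n    " (mws.map (fun mw => "\"" ++ mw ++ "\"")) ++ "\n]")

-- ===== PRECONDITION & SPEC =====
def Spec_rewrite_middleware (use_whitenoise : Bool) (use_drf : Bool) (use_debug_toolbar : Bool) (settings : String) (out : String) : Prop := out = rewrite_middleware_alt use_whitenoise use_drf use_debug_toolbar settings
instance (use_whitenoise : Bool) (use_drf : Bool) (use_debug_toolbar : Bool) (settings : String) (out : String) : Decidable (Spec_rewrite_middleware use_whitenoise use_drf use_debug_toolbar settings out) := by unfold Spec_rewrite_middleware; infer_instance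

-- ===== CLAIM (what is proved, stated in full; the proofs are below) =====
def Claim_equal_rewrite_middleware : Prop := ∀ (use_whitenoise : Bool) (use_drf : Bool) (use_debug_toolbar : Bool) (settings : String), Dom_rewrite_middleware use_whitenoise use_drf use_debug_toolbar settings → Spec_rewrite_middleware use_whitenoise use_drf use_debug_toolbar settings (rewrite_middleware use_whitenoise use_drf use_debug_toolbar settings)

-- ===== LEMMAS AND PROOFS =====

-- ===== VERDICT (by name: the statement is the Claim_ definition above) =====
theorem rewrite_middleware_spec : Claim_equal_rewrite_middleware := by
  intro w d t s _
  unfold Spec_rewrite_middleware rewrite_middleware rewrite_middleware_alt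
  cases w <;> cases d <;> cases t <;> rfl
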